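-- pv_equiv track=rewrite | github.com/RaymondLiu777/AdventOfCode | 2023/day12/day12.py | validatePuzzle
-- ===== SOURCE A (Python) =====
-- def validatePuzzle(grid: str, groups: str):
--     groupIdx = 0
--     lastValue = "."
--     numValues = 0
--     for val in grid:
--         if(val == "?"):
--             return True
--         if(val == "." and lastValue == "#"):
--             if(groupIdx >= len(groups) or numValues != groups[groupIdx]):
--                 return False
--             groupIdx += 1
--         if(val == lastValue):
--             numValues += 1
--         else:
--             numValues = 1
--         lastValue = val
--     if(lastValue == "#"):
--         if(groupIdx >= len(groups) or numValues != groups[groupIdx]):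
--             return False
--         groupIdx += 1
--     return groupIdx == len(groups)
-- ===== SOURCE B (Python) =====
-- def validatePuzzle(grid: str, groups):
--     # Phase 1: extract the list of validated contiguous '#'-run lengths,
--     # Phase 2: compare it against groups in one go.
--     q = grid.find('?')
--     s = grid[:q] if q >= 0 else grid
--     runs = []
--     cnt = 0
--     for c in s:
--         if c == '#':
--             cnt += 1
--         else:
--             if cnt > 0 and c == '.':
--                 runs.append(cnt)
--             cnt = 0
--     if q >= 0:
--         # the run (if any) pending before '?' is never validated
--         return runs == list(groups)[:len(runs)]
--     if cnt > 0:
--         runs.append(cnt)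
--     return runs == list(groups)
-- ===== Notes on version B (the rewrite author's own statement) =====
-- stated objective: alternative
-- what changed: A validates runs online while scanning, carrying a group index and three early-return points; B first extracts the list of validated contiguous '#'-run lengths (cutting the grid at the first '?') and then compares that list against groups in a separate pass.
import Mathlib
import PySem

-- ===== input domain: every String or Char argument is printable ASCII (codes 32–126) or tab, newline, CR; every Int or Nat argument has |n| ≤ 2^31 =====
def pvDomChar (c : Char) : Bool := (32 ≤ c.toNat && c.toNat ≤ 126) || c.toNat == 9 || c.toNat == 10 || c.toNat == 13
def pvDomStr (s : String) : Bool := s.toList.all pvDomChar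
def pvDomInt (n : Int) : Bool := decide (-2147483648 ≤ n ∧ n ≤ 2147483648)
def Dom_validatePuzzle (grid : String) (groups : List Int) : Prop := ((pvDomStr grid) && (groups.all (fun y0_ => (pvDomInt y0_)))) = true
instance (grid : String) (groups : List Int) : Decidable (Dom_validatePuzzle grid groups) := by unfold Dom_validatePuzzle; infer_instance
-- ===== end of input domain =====

-- B extracts the validated '#'-run lengths first and compares against groups in a
-- separate pass, instead of A's online validation with a group index (objective: alternative).

-- ===== PORT A =====
-- the for-loop of A: state (groupIdx, lastValue, numValues), early returns at '?' and on a failed check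
def goA (groups : List Int) : List Char → Int → Char → Int → Bool
  | [], gi, lv, nv =>
    if lv = '#' then
      if gi ≥ (groups.length : Int) ∨ ¬ (PySem.List.pyGet? groups gi = some nv) then false
      else decide (gi + 1 = (groups.length : Int))
    else decide (gi = (groups.length : Int))
  | c :: rest, gi, lv, nv =>
    if c = '?' then true
    else if c = '.' ∧ lv = '#' then
      if gi ≥ (groups.length : Int) ∨ ¬ (PySem.List.pyGet? groups gi = some nv) then false
      else goA groups rest (gi + 1) c (if c = lv then nv + 1 else 1)
    else goA groups rest gi c (if c = lv then nv + 1 else 1)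

def validatePuzzle (grid : String) (groups : List Int) : Bool :=
  goA groups grid.toList 0 '.' 0

-- ===== PORT B =====
-- the for-loop of Source B: state (runs, cnt); appends a run length when a '#'-run is closed by '.'
def bLoop : List Char → List Int → Int → List Int × Int
  | [], runs, cnt => (runs, cnt)
  | c :: rest, runs, cnt =>
    if c = '#' then bLoop rest runs (cnt + 1)
    else if 0 < cnt ∧ c = '.' then bLoop rest (runs ++ [cnt]) 0
    else bLoop rest runs 0

def validatePuzzle_alt (grid : String) (groups : List Int) : Bool :=
  let q := PySem.Str.find grid "?"
  let s := if q ≥ 0 then PySem.Str.slice grid none (some q) else grid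
  let rc := bLoop s.toList [] 0
  if q ≥ 0 then
    rc.1 == PySem.List.slice groups none (some (rc.1.length : Int))
  else
    (if 0 < rc.2 then rc.1 ++ [rc.2] else rc.1) == groups

-- ===== PRECONDITION & SPEC =====
def Spec_validatePuzzle (grid : String) (groups : List Int) (out : Bool) : Prop := out = validatePuzzle_alt grid groups
instance (grid : String) (groups : List Int) (out : Bool) : Decidable (Spec_validatePuzzle grid groups out) := by unfold Spec_validatePuzzle; infer_instance

-- ===== CLAIM (what is proved, stated in full; the proofs are below) =====
def Claim_equal_validatePuzzle : Prop := ∀ (grid : String) (groups : List Int), Dom_validatePuzzle grid groups → Spec_validatePuzzle grid groups (validatePuzzle grid groups)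

-- ===== LEMMAS AND PROOFS =====

-- Int-list BEq as a decidable equality (used to read off A's online checks as list equality)
theorem listBeq_eq_decide (a b : List Int) : (a == b) = decide (a = b) := by
  by_cases h : a = b <;> simp [h]

theorem beq_false_of_head_ne (a b : Int) (l1 l2 : List Int) (h : a ≠ b) :
    ((a :: l1) == (b :: l2)) = false := by
  rw [beq_eq_false_iff_ne]
  intro hh
  injection hh with h1 _
  exact h h1

theorem cons_beq_nil (a : Int) (l : List Int) : ((a :: l) == ([] : List Int)) = false := rfl

theorem cons_eq_cons_iff (a : Int) (l1 l2 : List Int) : (a :: l1 = a :: l2) ↔ l1 = l2 := by simp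

-- reference scan: the validated run lengths A's loop emits, and whether the scan stopped at '?'
def scanRuns : List Char → Char → Int → List Int × Bool
  | [], lv, nv => (if lv = '#' then [nv] else [], false)
  | c :: rest, lv, nv =>
    if c = '?' then ([], true)
    else
      let r := scanRuns rest c (if c = lv then nv + 1 else 1)
      if c = '.' ∧ lv = '#' then (nv :: r.1, r.2) else r

-- A's online check equals a list comparison of the emitted runs against groups.drop g
theorem goA_eq_scan (groups : List Int) (cs : List Char) (g : Nat) (lv : Char) (nv : Int)
    (hg : g ≤ groups.length) :
    goA groups cs (g : Int) lv nv =
      (if (scanRuns cs lv nv).2 then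
        (scanRuns cs lv nv).1 == (groups.drop g).take (scanRuns cs lv nv).1.length
      else
        (scanRuns cs lv nv).1 == groups.drop g) := by
  induction cs generalizing g lv nv with
  | nil =>
    simp only [goA, scanRuns]
    by_cases hlv : lv = '#'
    · simp only [if_pos hlv]
      by_cases hlt : g < groups.length
      · have hget : PySem.List.pyGet? groups (g : Int) = some groups[g] := by
          simp [hlt]
        have hdrop : groups.drop g = groups[g] :: groups.drop (g + 1) :=
          List.drop_eq_getElem_cons hlt
        rw [hget]
        by_cases hnv : nv = groups[g]
        · have hcond : ¬ ((g : Int) ≥ (groups.length : Int) ∨ ¬ (some groups[g] = some nv)) := by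
            rintro (h | h)
            · omega
            · exact h (by rw [hnv])
          rw [if_neg hcond]
          simp only [listBeq_eq_decide, Bool.false_eq_true, if_false]
          rw [decide_eq_decide]
          constructor
          · intro h
            rw [hdrop, List.drop_eq_nil_of_le (by omega), hnv]
          · intro h
            have hlen := congrArg List.length h
            rw [hdrop] at hlen
            simp at hlen
            omega
        · have hcond : ((g : Int) ≥ (groups.length : Int) ∨ ¬ (some groups[g] = some nv)) :=
            Or.inr (fun h => hnv (Option.some.inj h).symm)
          rw [if_pos hcond, hdrop]
          exact (beq_false_of_head_ne _ _ _ _ hnv).symm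
      · have hcond : ((g : Int) ≥ (groups.length : Int) ∨ ¬ (PySem.List.pyGet? groups (g : Int) = some nv)) :=
          Or.inl (by omega)
        rw [if_pos hcond, List.drop_eq_nil_of_le (by omega)]
        rfl
    · simp only [if_neg hlv, Bool.false_eq_true, if_false]
      rw [listBeq_eq_decide, decide_eq_decide]
      constructor
      · intro h
        exact (List.drop_eq_nil_of_le (by omega)).symm
      · intro h
        have := List.drop_eq_nil_iff.mp h.symm
        omega
  | cons c rest ih =>
    by_cases hcq : c = '?'
    · simp [goA, scanRuns, hcq]
    · by_cases hcd : c = '.' ∧ lv = '#'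
      · simp only [goA, scanRuns, if_neg hcq, if_pos hcd]
        by_cases hlt : g < groups.length
        · have hget : PySem.List.pyGet? groups (g : Int) = some groups[g] := by
            simp [hlt]
          have hdrop : groups.drop g = groups[g] :: groups.drop (g + 1) :=
            List.drop_eq_getElem_cons hlt
          rw [hget]
          by_cases hnv : nv = groups[g]
          · have hcond : ¬ ((g : Int) ≥ (groups.length : Int) ∨ ¬ (some groups[g] = some nv)) := by
              rintro (h | h)
              · omega
              · exact h (by rw [hnv])
            rw [if_neg hcond]
            have hcast : (g : Int) + 1 = ((g + 1 : Nat) : Int) := by push_cast; ring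
            rw [hcast, ih (g + 1) c (if c = lv then nv + 1 else 1) (by omega)]
            cases hr : (scanRuns rest c (if c = lv then nv + 1 else 1)).2
            · rw [if_neg Bool.false_ne_true, if_neg Bool.false_ne_true, hnv,
                listBeq_eq_decide, listBeq_eq_decide, decide_eq_decide, hdrop, cons_eq_cons_iff]
            · rw [if_pos rfl, if_pos rfl, hnv, listBeq_eq_decide, listBeq_eq_decide,
                decide_eq_decide, hdrop, List.length_cons, List.take_succ_cons, cons_eq_cons_iff]
          · have hcond : ((g : Int) ≥ (groups.length : Int) ∨ ¬ (some groups[g] = some nv)) :=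
              Or.inr (fun h => hnv (Option.some.inj h).symm)
            rw [if_pos hcond]
            cases hr : (scanRuns rest c (if c = lv then nv + 1 else 1)).2
            · rw [if_neg Bool.false_ne_true, hdrop, beq_false_of_head_ne _ _ _ _ hnv]
            · rw [if_pos rfl, hdrop, List.length_cons, List.take_succ_cons,
                beq_false_of_head_ne _ _ _ _ hnv]
        · have hcond : ((g : Int) ≥ (groups.length : Int) ∨ ¬ (PySem.List.pyGet? groups (g : Int) = some nv)) :=
            Or.inl (by omega)
          rw [if_pos hcond, List.drop_eq_nil_of_le (by omega)]
          cases hr : (scanRuns rest c (if c = lv then nv + 1 else 1)).2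
          · rw [if_neg Bool.false_ne_true, cons_beq_nil]
          · rw [if_pos rfl, List.take_nil, cons_beq_nil]
      · simp only [goA, scanRuns, if_neg hcq, if_neg hcd]
        exact ih g c (if c = lv then nv + 1 else 1) hg

-- Source B's loop with accumulator: the accumulator is a prefix of the result
theorem bLoop_acc (cs : List Char) (runs : List Int) (cnt : Int) :
    bLoop cs runs cnt = (runs ++ (bLoop cs [] cnt).1, (bLoop cs [] cnt).2) := by
  induction cs generalizing runs cnt with
  | nil => simp [bLoop]
  | cons c rest ih =>
    simp only [bLoop]
    split_ifs with h1 h2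
    · exact ih runs (cnt + 1)
    · simp only [List.nil_append]
      rw [ih (runs ++ [cnt]) 0, ih [cnt] 0]; simp
    · exact ih runs 0

-- invariant linking A's (lastValue, numValues) to Source B's cnt
def stInv (lv : Char) (nv cnt : Int) : Prop :=
  (lv = '#' → 0 < cnt ∧ nv = cnt) ∧ (lv ≠ '#' → cnt = 0)

-- on a '?'-free string, the reference scan is Source B's loop plus the pending trailing run
theorem scan_eq_bLoop (cs : List Char) (lv : Char) (nv cnt : Int)
    (hq : '?' ∉ cs) (hinv : stInv lv nv cnt) :
    scanRuns cs lv nv =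
      ((bLoop cs [] cnt).1 ++ (if 0 < (bLoop cs [] cnt).2 then [(bLoop cs [] cnt).2] else []), false) := by
  induction cs generalizing lv nv cnt with
  | nil =>
    obtain ⟨h1, h2⟩ := hinv
    by_cases hlv : lv = '#'
    · obtain ⟨hc, hn⟩ := h1 hlv
      simp [scanRuns, bLoop, hlv, hc, hn]
    · simp [scanRuns, bLoop, hlv, h2 hlv]
  | cons c rest ih =>
    have hq' : '?' ∉ rest := fun h => hq (List.mem_cons_of_mem _ h)
    have hcq : c ≠ '?' := fun h => hq (h ▸ List.mem_cons_self)
    obtain ⟨h1, h2⟩ := hinv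
    by_cases hch : c = '#'
    · have hnv' : stInv c (if c = lv then nv + 1 else 1) (cnt + 1) := by
        constructor
        · intro _
          by_cases hlv : c = lv
          · obtain ⟨hc0, hn⟩ := h1 (hlv ▸ hch)
            simp [hlv, hn]; omega
          · have : lv ≠ '#' := fun h => hlv (hch.trans h.symm)
            simp [hlv, h2 this]
        · intro h; exact absurd hch h
      have hcd : ¬ (c = '.' ∧ lv = '#') := fun h => by simp [hch] at h
      simp only [scanRuns, bLoop, if_neg hcq, if_neg hcd, if_pos hch]
      exact ih c _ (cnt + 1) hq' hnv'
    · have hinv0 : stInv c (if c = lv then nv + 1 else 1) 0 := by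
        constructor
        · intro h; exact absurd h hch
        · intro _; rfl
      by_cases hlv : lv = '#'
      · obtain ⟨hc0, hn⟩ := h1 hlv
        by_cases hcd : c = '.'
        · simp only [scanRuns, bLoop, if_neg hcq, if_neg hch, if_pos (And.intro hcd hlv),
            if_pos (And.intro hc0 hcd), List.nil_append]
          rw [bLoop_acc rest [cnt] 0, ih c _ 0 hq' hinv0]
          simp [hn]
        · have hcd' : ¬ (c = '.' ∧ lv = '#') := fun h => hcd h.1
          have hcd'' : ¬ (0 < cnt ∧ c = '.') := fun h => hcd h.2
          simp only [scanRuns, bLoop, if_neg hcq, if_neg hch, if_neg hcd', if_neg hcd'']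
          exact ih c _ 0 hq' hinv0
      · have hcd' : ¬ (c = '.' ∧ lv = '#') := fun h => hlv h.2
        simp only [scanRuns, bLoop, if_neg hcq, if_neg hch, if_neg hcd']
        rw [if_neg (fun h : 0 < cnt ∧ c = '.' => by rw [h2 hlv] at h; exact absurd h.1 (lt_irrefl 0))]
        exact ih c _ 0 hq' hinv0

-- cut at '?': the scan of pre ++ '?' :: post emits exactly Source B's runs for pre and stops
theorem scan_break (pre post : List Char) (lv : Char) (nv cnt : Int)
    (hq : '?' ∉ pre) (hinv : stInv lv nv cnt) :
    scanRuns (pre ++ '?' :: post) lv nv = ((bLoop pre [] cnt).1, true) := by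
  induction pre generalizing lv nv cnt with
  | nil => simp [scanRuns, bLoop]
  | cons c rest ih =>
    have hq' : '?' ∉ rest := fun h => hq (List.mem_cons_of_mem _ h)
    have hcq : c ≠ '?' := fun h => hq (h ▸ List.mem_cons_self)
    obtain ⟨h1, h2⟩ := hinv
    by_cases hch : c = '#'
    · have hnv' : stInv c (if c = lv then nv + 1 else 1) (cnt + 1) := by
        constructor
        · intro _
          by_cases hlv : c = lv
          · obtain ⟨hc0, hn⟩ := h1 (hlv ▸ hch)
            simp [hlv, hn]; omega
          · have : lv ≠ '#' := fun h => hlv (hch.trans h.symm)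
            simp [hlv, h2 this]
        · intro h; exact absurd hch h
      have hcd : ¬ (c = '.' ∧ lv = '#') := fun h => by simp [hch] at h
      simp only [List.cons_append, scanRuns, bLoop, if_neg hcq, if_neg hcd, if_pos hch]
      exact ih c _ (cnt + 1) hq' hnv'
    · have hinv0 : stInv c (if c = lv then nv + 1 else 1) 0 := by
        constructor
        · intro h; exact absurd h hch
        · intro _; rfl
      by_cases hlv : lv = '#'
      · obtain ⟨hc0, hn⟩ := h1 hlv
        by_cases hcd : c = '.'
        · simp only [List.cons_append, scanRuns, bLoop, if_neg hcq, if_neg hch,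
            if_pos (And.intro hcd hlv), if_pos (And.intro hc0 hcd), List.nil_append]
          rw [bLoop_acc rest [cnt] 0, ih c _ 0 hq' hinv0]
          simp [hn]
        · have hcd' : ¬ (c = '.' ∧ lv = '#') := fun h => hcd h.1
          have hcd'' : ¬ (0 < cnt ∧ c = '.') := fun h => hcd h.2
          simp only [List.cons_append, scanRuns, bLoop, if_neg hcq, if_neg hch, if_neg hcd',
            if_neg hcd'']
          exact ih c _ 0 hq' hinv0
      · have hcd' : ¬ (c = '.' ∧ lv = '#') := fun h => hlv h.2
        simp only [List.cons_append, scanRuns, bLoop, if_neg hcq, if_neg hch, if_neg hcd']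
        rw [if_neg (fun h : 0 < cnt ∧ c = '.' => by rw [h2 hlv] at h; exact absurd h.1 (lt_irrefl 0))]
        exact ih c _ 0 hq' hinv0

-- B's two outcomes, one per branch of the '?' test
theorem alt_pos (grid : String) (groups : List Int) (hq : PySem.Str.find grid "?" ≥ 0) :
    validatePuzzle_alt grid groups =
      ((bLoop (PySem.Str.slice grid none (some (PySem.Str.find grid "?"))).toList [] 0).1 ==
        PySem.List.slice groups none
          (some ((bLoop (PySem.Str.slice grid none (some (PySem.Str.find grid "?"))).toList [] 0).1.length : Int))) := by
  simp only [validatePuzzle_alt, if_pos hq]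

theorem alt_neg (grid : String) (groups : List Int) (hq : ¬ PySem.Str.find grid "?" ≥ 0) :
    validatePuzzle_alt grid groups =
      ((if 0 < (bLoop grid.toList [] 0).2 then
          (bLoop grid.toList [] 0).1 ++ [(bLoop grid.toList [] 0).2]
        else (bLoop grid.toList [] 0).1) == groups) := by
  simp only [validatePuzzle_alt, if_neg hq]

-- ===== VERDICT (by name: the statement is the Claim_ definition above) =====
theorem validatePuzzle_spec : Claim_equal_validatePuzzle := by
  intro grid groups _
  unfold Spec_validatePuzzle validatePuzzle
  have hinv0 : stInv '.' 0 0 := ⟨fun h => absurd h (by decide), fun _ => rfl⟩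
  have hmain := goA_eq_scan groups grid.toList 0 '.' 0 (Nat.zero_le _)
  rw [Nat.cast_zero, List.drop_zero] at hmain
  have hfind : PySem.Str.find grid "?" = PySem.Chars.find grid.toList ['?'] := rfl
  by_cases hq : PySem.Str.find grid "?" ≥ 0
  · -- '?' present: both sides validate the runs before the first '?' as a prefix of groups
    have hq' : (0 : Int) ≤ PySem.Chars.find grid.toList ['?'] := by rw [← hfind]; exact hq
    obtain ⟨hpre, hmin⟩ := PySem.Chars.find_spec (s := grid.toList) (sub := ['?']) hq'
    obtain ⟨post, hpost⟩ := hpre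
    have hdecomp : grid.toList =
        grid.toList.take (PySem.Chars.find grid.toList ['?']).toNat ++ '?' :: post := by
      conv_lhs => rw [← List.take_append_drop (PySem.Chars.find grid.toList ['?']).toNat grid.toList]
      rw [← hpost]
      simp
    have hnot : '?' ∉ grid.toList.take (PySem.Chars.find grid.toList ['?']).toNat := by
      intro hmem
      obtain ⟨i, hi, hgi⟩ := List.getElem_of_mem hmem
      have hlen := hi
      rw [List.length_take] at hlen
      have hik : i < (PySem.Chars.find grid.toList ['?']).toNat := by omega
      have hil : i < grid.toList.length := by omega
      have hgi' : grid.toList[i] = '?' := by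
        simpa using hgi
      have hdropi : grid.toList.drop i = '?' :: grid.toList.drop (i + 1) := by
        rw [List.drop_eq_getElem_cons hil, hgi']
      exact hmin i hik ⟨grid.toList.drop (i + 1), by rw [hdropi]; rfl⟩
    have hscan : scanRuns grid.toList '.' 0 =
        ((bLoop (grid.toList.take (PySem.Chars.find grid.toList ['?']).toNat) [] 0).1, true) := by
      conv_lhs => rw [hdecomp]
      exact scan_break _ _ _ _ _ hnot hinv0
    have hslice : (PySem.Str.slice grid none (some (PySem.Str.find grid "?"))).toList =
        grid.toList.take (PySem.Chars.find grid.toList ['?']).toNat := by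
      rw [PySem.Str.toList_slice, PySem.Chars.slice_eq_listSlice, hfind]
      exact PySem.List.slice_to _ hq'
    rw [alt_pos grid groups hq, hslice, hmain, hscan]
    rw [if_pos (show ((bLoop (grid.toList.take (PySem.Chars.find grid.toList ['?']).toNat) [] 0).1,
      true).2 = true from rfl)]
    dsimp only
    rw [PySem.List.slice_to _ (Int.natCast_nonneg _), Int.toNat_natCast]
  · -- no '?': both sides compare the full validated run list (trailing run included) with groups
    have hq2 : PySem.Chars.find grid.toList ['?'] = -1 := by
      have h1 := PySem.Chars.neg_one_le_find grid.toList ['?']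
      rw [hfind] at hq
      omega
    have hnotin : '?' ∉ grid.toList := by
      intro hmem
      obtain ⟨s1, s2, hsplit⟩ := List.append_of_mem hmem
      have hinf : (['?'] : List Char) <:+: grid.toList := ⟨s1, s2, by rw [hsplit]; simp⟩
      exact ((PySem.Str.find_eq_neg_one_iff grid "?").mp (by rw [hfind]; exact hq2)) hinf
    have hscan := scan_eq_bLoop grid.toList '.' 0 0 hnotin hinv0
    rw [alt_neg grid groups hq, hmain, hscan]
    rw [if_neg (show ¬ (((bLoop grid.toList [] 0).1 ++
      (if 0 < (bLoop grid.toList [] 0).2 then [(bLoop grid.toList [] 0).2] else []),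
      false).2 = true) from Bool.false_ne_true)]
    dsimp only
    by_cases he : 0 < (bLoop grid.toList [] 0).2
    · rw [if_pos he, if_pos he]
    · rw [if_neg he, if_neg he, List.append_nil]
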